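-- pv_equiv track=rewrite | github.com/paulklemstine/factor | v22_ultimate_fusion.py | delta_decode
-- ===== SOURCE A (Python) =====
-- def delta_decode(deltas, heads, order=1):
--     """Inverse delta decode."""
--     result = list(deltas)
--     for i in range(order - 1, -1, -1):
--         new = [heads[i]]
--         for d in result:
--             new.append(new[-1] + d)
--         result = new
--     return result
-- ===== SOURCE B (Python) =====
-- def delta_decode(deltas, heads, order=1):
--     """Inverse delta decode: single-pass forward-differencing integrator.
--
--     Keeps one running accumulator per level (acc[0] outermost) instead of
--     rebuilding a full intermediate list for each of the `order` passes.
--     """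
--     if order <= 0:
--         return list(deltas)
--     k = order
--     n = len(deltas)
--     acc = list(heads[:k])
--     out = [acc[0]]
--     for t in range(1, n + k):
--         if t >= k:
--             acc[k - 1] += deltas[t - k]
--         for i in range(k - 2, -1, -1):
--             if t > i:
--                 acc[i] += acc[i + 1]
--         out.append(acc[0])
--     return out
-- ===== Notes on version B (the rewrite author's own statement) =====
-- stated objective: alternative
-- what changed: Replaced the order-many cumulative-sum passes, each rebuilding a full intermediate list, by a single-pass forward-differencing integrator that keeps one running accumulator per level and emits each output element once.
import Mathlib
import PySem

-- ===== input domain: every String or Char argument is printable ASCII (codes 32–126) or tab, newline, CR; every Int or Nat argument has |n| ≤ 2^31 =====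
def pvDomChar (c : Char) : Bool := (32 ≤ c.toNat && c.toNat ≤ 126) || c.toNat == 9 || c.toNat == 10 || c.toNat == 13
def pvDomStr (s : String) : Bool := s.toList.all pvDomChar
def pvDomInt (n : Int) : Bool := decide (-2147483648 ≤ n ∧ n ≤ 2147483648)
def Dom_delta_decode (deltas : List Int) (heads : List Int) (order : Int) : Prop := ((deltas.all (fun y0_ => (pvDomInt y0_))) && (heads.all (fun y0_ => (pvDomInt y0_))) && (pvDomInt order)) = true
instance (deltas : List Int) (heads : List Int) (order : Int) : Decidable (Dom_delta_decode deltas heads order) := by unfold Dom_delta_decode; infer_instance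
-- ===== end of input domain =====

-- B replaces A's order-many cumulative-sum passes by a one-pass integrator with one
-- running accumulator per level (objective: alternative algorithm, same asymptotic cost).

-- ===== PORT A =====
def delta_decode (deltas : List Int) (heads : List Int) (order : Int) : List Int :=
  (PySem.List.pyRange (order - 1) (-1) (-1)).foldl
    (fun result i =>
      -- new = [heads[i]]; for d in result: new.append(new[-1] + d)
      result.foldl (fun new d => new ++ [PySem.List.pyGetD new (-1) 0 + d])
        [PySem.List.pyGetD heads i 0])
    deltas

-- ===== PORT B =====
-- one step of Source B's outer loop: the guarded delta feed into the innermost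
-- accumulator, then the inner-to-outer cascade acc[i] += acc[i+1]
def pyIntegratorStep (deltas : List Int) (k : Int) (t : Int) (acc : List Int) : List Int :=
  let acc := if k ≤ t then
      PySem.List.pySetD acc (k - 1)
        (PySem.List.pyGetD acc (k - 1) 0 + PySem.List.pyGetD deltas (t - k) 0)
    else acc
  (PySem.List.pyRange (k - 2) (-1) (-1)).foldl
    (fun acc i =>
      if i < t then
        PySem.List.pySetD acc i (PySem.List.pyGetD acc i 0 + PySem.List.pyGetD acc (i + 1) 0)
      else acc)
    acc

def delta_decode_alt (deltas : List Int) (heads : List Int) (order : Int) : List Int :=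
  if order ≤ 0 then deltas
  else
    let k := order
    let n : Int := deltas.length
    let acc := PySem.List.slice heads none (some k)      -- acc = list(heads[:k])
    let st := (PySem.List.pyRange 1 (n + k) 1).foldl
      (fun (st : List Int × List Int) t =>
        let acc := pyIntegratorStep deltas k t st.1
        (acc, st.2 ++ [PySem.List.pyGetD acc 0 0]))
      (acc, [PySem.List.pyGetD acc 0 0])
    st.2

-- ===== PRECONDITION & SPEC =====
-- Pre_ excludes exactly the inputs where A raises IndexError: 1 ≤ order but heads has
-- fewer than `order` elements (A reads heads[order-1], …, heads[0]).
def Pre_delta_decode (deltas : List Int) (heads : List Int) (order : Int) : Prop :=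
  order ≤ 0 ∨ order ≤ (heads.length : Int)
instance (deltas : List Int) (heads : List Int) (order : Int) : Decidable (Pre_delta_decode deltas heads order) := by unfold Pre_delta_decode; infer_instance

def pvWitness_delta_decode : List Int × List Int × Int := ([1, -2, 3], [4, 7], 2)

def Spec_delta_decode (deltas : List Int) (heads : List Int) (order : Int) (out : List Int) : Prop := out = delta_decode_alt deltas heads order
instance (deltas : List Int) (heads : List Int) (order : Int) (out : List Int) : Decidable (Spec_delta_decode deltas heads order out) := by unfold Spec_delta_decode; infer_instance

-- ===== CLAIM (what is proved, stated in full; the proofs are below) =====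
def Claim_equal_delta_decode : Prop := ∀ (deltas : List Int) (heads : List Int) (order : Int), Dom_delta_decode deltas heads order → Pre_delta_decode deltas heads order → Spec_delta_decode deltas heads order (delta_decode deltas heads order)

-- ===== LEMMAS AND PROOFS =====

-- common specification: `sc h xs` is the cumulative-sum scan starting at h
def sc (h : Int) : List Int → List Int
  | [] => [h]
  | d :: ds => h :: sc (h + d) ds

-- `passes hs xs` applies one scan per element of hs, hs.head outermost
def passes : List Int → List Int → List Int
  | [], xs => xs
  | h :: t, xs => sc h (passes t xs)

-- port-side run of the integrator: state after T steps of Source B's loop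
def pFrun (ds : List Int) (k : Int) (a0 : List Int) : Nat → List Int
  | 0 => a0
  | T + 1 => pyIntegratorStep ds k ((T : Int) + 1) (pFrun ds k a0 T)

-- clean recursive form of one integrator step; head of acc is level j
def cstep (ds : List Int) (t : Int) : Int → List Int → List Int
  | _, [] => []
  | j, a :: rest =>
      match rest with
      | [] => [if j < t then a + PySem.List.pyGetD ds (t - j - 1) 0 else a]
      | _ :: _ =>
          let r := cstep ds t (j + 1) rest
          (if j < t then a + PySem.List.pyGetD r 0 0 else a) :: r

-- state of the clean machine after T steps
def crun (ds hs : List Int) : Nat → List Int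
  | 0 => hs
  | T + 1 => cstep ds ((T : Int) + 1) 0 (crun ds hs T)

-- outputs of the clean machine, indices 0..N
def cout (ds hs : List Int) (N : Nat) : List Int :=
  (List.range (N + 1)).map (fun T => (crun ds hs T).getD 0 0)

theorem cstep_singleton (ds : List Int) (t j a : Int) :
    cstep ds t j [a] = [if j < t then a + PySem.List.pyGetD ds (t - j - 1) 0 else a] := rfl

theorem cstep_cons_cons (ds : List Int) (t j a b : Int) (r2 : List Int) :
    cstep ds t j (a :: b :: r2)
      = (if j < t then a + PySem.List.pyGetD (cstep ds t (j + 1) (b :: r2)) 0 0 else a)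
          :: cstep ds t (j + 1) (b :: r2) := rfl

-- ---------- A side ----------

theorem scanA (xs : List Int) : ∀ (pre : List Int) (h : Int),
    xs.foldl (fun new d => new ++ [PySem.List.pyGetD new (-1) 0 + d]) (pre ++ [h])
      = pre ++ sc h xs := by
  induction xs with
  | nil => intro pre h; simp [sc]
  | cons d ds ih =>
      intro pre h
      have : (pre ++ [h]) ++ [PySem.List.pyGetD (pre ++ [h]) (-1) 0 + d]
           = (pre ++ [h]) ++ [h + d] := by
        rw [PySem.List.pyGetD_neg_one_append_singleton]
      simp only [List.foldl_cons, this]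
      rw [List.append_assoc] at *
      have := ih (pre ++ [h]) (h + d)
      simpa [sc, List.append_assoc] using this

theorem passes_snoc (l : List Int) (h : Int) (xs : List Int) :
    passes (l ++ [h]) xs = passes l (sc h xs) := by
  induction l with
  | nil => simp [passes]
  | cons a t ih => simp [passes, ih]

theorem A_char (heads : List Int) : ∀ (m : Nat) (xs : List Int), (m : Int) ≤ (heads.length : Int) →
    (PySem.List.pyRange ((m : Int) - 1) (-1) (-1)).foldl
      (fun result i =>
        result.foldl (fun new d => new ++ [PySem.List.pyGetD new (-1) 0 + d])
          [PySem.List.pyGetD heads i 0])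
      xs
      = passes (heads.take m) xs := by
  intro m
  induction m with
  | zero =>
      intro xs _
      rw [PySem.List.pyRange_neg_one_eq_nil (by norm_num)]
      simp [passes]
  | succ m ih =>
      intro xs hm
      have hmlt : m < heads.length := by omega
      have hc : ((m + 1 : Nat) : Int) - 1 = (m : Int) := by push_cast; ring
      rw [hc, PySem.List.pyRange_neg_one_cons (by omega), List.foldl_cons]
      have hsc : xs.foldl (fun new d => new ++ [PySem.List.pyGetD new (-1) 0 + d])
          [PySem.List.pyGetD heads (m : Int) 0] = sc (heads[m]) xs := by
        have := scanA xs [] (PySem.List.pyGetD heads (m : Int) 0)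
        simp only [List.nil_append] at this
        rw [this, PySem.List.pyGetD_natCast, List.getD_eq_getElem heads 0 hmlt]
      rw [hsc, ih (sc heads[m] xs) (by omega)]
      have htake : List.take (m + 1) heads = List.take m heads ++ [heads[m]] := by
        rw [List.take_add_one, List.getElem?_eq_getElem hmlt]; rfl
      rw [htake, passes_snoc]

theorem A_eq (deltas heads : List Int) (order : Int)
    (h1 : 1 ≤ order) (h2 : order ≤ (heads.length : Int)) :
    delta_decode deltas heads order = passes (heads.take order.toNat) deltas := by
  unfold delta_decode
  have ho : ((order.toNat : Nat) : Int) = order := Int.toNat_of_nonneg (by omega)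
  rw [← ho]
  exact A_char heads order.toNat deltas (by omega)

-- ---------- B side ----------

theorem length_cstep (ds : List Int) (t : Int) : ∀ (j : Int) (acc : List Int),
    (cstep ds t j acc).length = acc.length := by
  intro j acc
  induction acc generalizing j with
  | nil => simp [cstep]
  | cons a rest ih =>
      cases rest with
      | nil => simp [cstep]
      | cons b r2 => rw [cstep_cons_cons, List.length_cons, ih]; rfl

theorem cstep_of_le (ds : List Int) (t : Int) : ∀ (j : Int) (acc : List Int), t ≤ j →
    cstep ds t j acc = acc := by
  intro j acc
  induction acc generalizing j with
  | nil => intro _; simp [cstep]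
  | cons a rest ih =>
      intro hle
      cases rest with
      | nil => rw [cstep_singleton]; simp [not_lt_of_ge hle]
      | cons b r2 =>
          rw [cstep_cons_cons, ih (j + 1) (by omega)]
          simp [not_lt_of_ge hle]

theorem cstep_shift (ds : List Int) (t : Int) : ∀ (j : Int) (acc : List Int),
    cstep ds t (j + 1) acc = cstep ds (t - 1) j acc := by
  intro j acc
  induction acc generalizing j with
  | nil => simp [cstep]
  | cons a rest ih =>
      cases rest with
      | nil =>
          rw [cstep_singleton, cstep_singleton]
          have h2 : t - (j + 1) - 1 = t - 1 - j - 1 := by omega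
          by_cases hlt : j < t - 1
          · simp [hlt, show j + 1 < t by omega, h2]
          · simp [hlt, show ¬ (j + 1 < t) by omega]
      | cons b r2 =>
          rw [cstep_cons_cons, cstep_cons_cons, ih (j + 1)]
          by_cases hlt : j < t - 1
          · simp [hlt, show j + 1 < t by omega]
          · simp [hlt, show ¬ (j + 1 < t) by omega]

-- the two stages of pyIntegratorStep, named for the proofs
def dfeed (ds : List Int) (k t : Int) (acc : List Int) : List Int :=
  if k ≤ t then
    PySem.List.pySetD acc (k - 1)
      (PySem.List.pyGetD acc (k - 1) 0 + PySem.List.pyGetD ds (t - k) 0)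
  else acc

def cascadeOp (t : Int) (acc : List Int) (i : Int) : List Int :=
  if i < t then
    PySem.List.pySetD acc i (PySem.List.pyGetD acc i 0 + PySem.List.pyGetD acc (i + 1) 0)
  else acc

theorem pstep_def (ds : List Int) (k t : Int) (acc : List Int) :
    pyIntegratorStep ds k t acc
      = (PySem.List.pyRange (k - 2) (-1) (-1)).foldl (cascadeOp t) (dfeed ds k t acc) := rfl

theorem pySetD_cons_pos (a : Int) (x : List Int) (i : Int) (v : Int) (h : 1 ≤ i) :
    PySem.List.pySetD (a :: x) i v = a :: PySem.List.pySetD x (i - 1) v := by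
  rw [PySem.List.pySetD_of_nonneg _ _ (by omega), PySem.List.pySetD_of_nonneg _ _ (by omega)]
  have hi : i.toNat = (i - 1).toNat + 1 := by omega
  rw [hi, List.set_cons_succ]

theorem pyGetD_cons_pos (a : Int) (x : List Int) (i : Int) (d : Int) (h : 1 ≤ i) :
    PySem.List.pyGetD (a :: x) i d = PySem.List.pyGetD x (i - 1) d := by
  rw [PySem.List.pyGetD_of_nonneg _ _ (by omega), PySem.List.pyGetD_of_nonneg _ _ (by omega)]
  have hi : i.toNat = (i - 1).toNat + 1 := by omega
  rw [hi, List.getD_cons_succ]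

theorem dfeed_cons (ds : List Int) (k t a : Int) (rest : List Int) (hk : 2 ≤ k) :
    dfeed ds k t (a :: rest) = a :: dfeed ds (k - 1) (t - 1) rest := by
  unfold dfeed
  by_cases hle : k ≤ t
  · rw [if_pos hle, if_pos (by omega : k - 1 ≤ t - 1)]
    rw [pySetD_cons_pos _ _ _ _ (by omega), pyGetD_cons_pos _ _ _ _ (by omega)]
    have h1 : k - 1 - 1 = k - 1 - 1 := rfl
    have h2 : t - k = t - 1 - (k - 1) := by ring
    rw [h2]
  · rw [if_neg hle, if_neg (by omega)]

theorem cascadeOp_cons (t a i : Int) (y : List Int) (hi : 0 ≤ i) :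
    cascadeOp t (a :: y) (i + 1) = a :: cascadeOp (t - 1) y i := by
  unfold cascadeOp
  by_cases hlt : i < t - 1
  · rw [if_pos (by omega : i + 1 < t), if_pos hlt]
    rw [pySetD_cons_pos _ _ _ _ (by omega), pyGetD_cons_pos _ _ _ _ (by omega),
        pyGetD_cons_pos _ _ _ _ (by omega)]
    have h1 : i + 1 - 1 = i := by ring
    have h2 : i + 1 + 1 - 1 = i + 1 := by ring
    rw [h1, h2]
  · rw [if_neg (by omega), if_neg hlt]

theorem cascadeOp_zero (t a : Int) (x : List Int) :
    cascadeOp t (a :: x) 0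
      = (if 0 < t then a + PySem.List.pyGetD x 0 0 else a) :: x := by
  unfold cascadeOp
  by_cases hlt : 0 < t
  · rw [if_pos hlt, if_pos hlt]
    rw [PySem.List.pySetD_of_nonneg _ _ (by omega), PySem.List.pyGetD_zero_cons,
        pyGetD_cons_pos _ _ _ _ (by omega)]
    norm_num
  · rw [if_neg hlt, if_neg hlt]

theorem range_neg_split (k : Int) (hk : 2 ≤ k) :
    PySem.List.pyRange (k - 2) (-1) (-1)
      = ((PySem.List.pyRange (k - 3) (-1) (-1)).map (· + 1)) ++ [0] := by
  rw [PySem.List.pyRange_neg_one, PySem.List.pyRange_neg_one]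
  have h1 : (k - 2 - -1).toNat = (k - 3 - -1).toNat + 1 := by omega
  rw [h1, List.range_succ, List.map_append, List.map_map]
  congr 1
  · refine List.map_congr_left ?_
    intro i _
    simp [Function.comp]
    ring
  · simp
    omega

theorem foldl_shift (t a : Int) : ∀ (l : List Int) (x : List Int), (∀ i ∈ l, 0 ≤ i) →
    l.foldl (fun s i => cascadeOp t s (i + 1)) (a :: x)
      = a :: l.foldl (cascadeOp (t - 1)) x := by
  intro l
  induction l with
  | nil => intro x _; rfl
  | cons i l' ih =>
      intro x hmem
      rw [List.foldl_cons, List.foldl_cons,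
          cascadeOp_cons t a i x (hmem i (by simp))]
      exact ih _ (fun j hj => hmem j (by simp [hj]))

theorem pstep_eq_cstep (ds : List Int) : ∀ (acc : List Int) (k t : Int),
    acc ≠ [] → (acc.length : Int) = k →
    pyIntegratorStep ds k t acc = cstep ds t 0 acc := by
  intro acc
  induction acc with
  | nil => intro k t h _; exact absurd rfl h
  | cons a rest ih =>
      intro k t _ hk
      cases rest with
      | nil =>
          have hk1 : k = 1 := by simp at hk; omega
          subst hk1
          rw [pstep_def, cstep_singleton]
          rw [show (1:Int) - 2 = -1 by ring, PySem.List.pyRange_neg_one_eq_nil (by norm_num),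
              List.foldl_nil]
          unfold dfeed
          by_cases hlt : 0 < t
          · rw [if_pos (by omega : (1:Int) ≤ t), if_pos hlt]
            rw [show (1:Int) - 1 = 0 by ring,
                PySem.List.pySetD_of_nonneg _ _ (by norm_num), PySem.List.pyGetD_zero_cons]
            simp
          · rw [if_neg (by omega), if_neg hlt]
      | cons b r2 =>
          have hk2 : 2 ≤ k := by simp at hk; omega
          rw [cstep_cons_cons, cstep_shift ds t 0 (b :: r2),
              ← ih (k - 1) (t - 1) (by simp) (by simp at hk ⊢; omega)]
          rw [pstep_def, pstep_def, dfeed_cons ds k t a (b :: r2) hk2,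
              range_neg_split k hk2, List.foldl_append, List.foldl_map,
              foldl_shift t a _ _ (fun i hi => by
                rw [PySem.List.mem_pyRange_neg_one] at hi; omega),
              List.foldl_cons, List.foldl_nil, cascadeOp_zero]
          have h3 : k - 1 - 2 = k - 3 := by ring
          rw [h3]

theorem crun_length (ds hs : List Int) : ∀ (T : Nat), (crun ds hs T).length = hs.length := by
  intro T
  induction T with
  | zero => rfl
  | succ T ih => simp only [crun, length_cstep]; exact ih

theorem B_fold (ds : List Int) (k : Int) (a0 : List Int) : ∀ (M : Nat),
    (PySem.List.pyRange 1 ((M : Int) + 1) 1).foldl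
      (fun (st : List Int × List Int) t =>
        let acc := pyIntegratorStep ds k t st.1
        (acc, st.2 ++ [PySem.List.pyGetD acc 0 0]))
      (a0, [PySem.List.pyGetD a0 0 0])
    = (pFrun ds k a0 M, (List.range (M + 1)).map (fun T => PySem.List.pyGetD (pFrun ds k a0 T) 0 0)) := by
  intro M
  induction M with
  | zero =>
      rw [show ((0 : Nat) : Int) + 1 = 1 by norm_num, PySem.List.pyRange_one_eq_nil (le_refl 1),
          List.foldl_nil]
      simp [pFrun, List.range_one]
  | succ M ih =>
      have e : ((M + 1 : Nat) : Int) + 1 = ((M : Int) + 1) + 1 := by push_cast; ring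
      rw [e, PySem.List.pyRange_one_succ_right (by omega), List.foldl_append, ih,
          List.foldl_cons, List.foldl_nil]
      conv_rhs => rw [List.range_succ, List.map_append]
      rfl

theorem pFrun_eq_crun (ds : List Int) (k : Int) (a0 : List Int)
    (hne : a0 ≠ []) (hk : (a0.length : Int) = k) :
    ∀ (T : Nat), pFrun ds k a0 T = crun ds a0 T := by
  intro T
  induction T with
  | zero => rfl
  | succ T ih =>
      have hlen : (crun ds a0 T).length = a0.length := crun_length ds a0 T
      have hne' : crun ds a0 T ≠ [] := by
        intro hnil; rw [hnil] at hlen; exact hne (List.eq_nil_of_length_eq_zero hlen.symm)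
      simp only [pFrun, crun, ih]
      exact pstep_eq_cstep ds (crun ds a0 T) k ((T : Int) + 1) hne' (by rw [hlen]; exact hk)

theorem cstep_crun (ds hs : List Int) (T : Nat) :
    cstep ds (T : Int) 0 (crun ds hs (T - 1)) = crun ds hs T := by
  cases T with
  | zero => exact cstep_of_le ds 0 0 (crun ds hs 0) (le_refl 0)
  | succ T =>
      have : ((T + 1 : Nat) : Int) = (T : Int) + 1 := by push_cast; ring
      rw [this, Nat.add_sub_cancel]
      rfl

-- the tail of the (h :: hs)-machine state is the hs-machine state one step earlier
theorem crun_tail (ds : List Int) (h : Int) (hs : List Int) (hne : hs ≠ []) :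
    ∀ (T : Nat), crun ds (h :: hs) T = (crun ds (h :: hs) T).getD 0 0 :: crun ds hs (T - 1) := by
  intro T
  induction T with
  | zero => rfl
  | succ T ih =>
      have hsub : crun ds hs (T - 1) ≠ [] := by
        have := crun_length ds hs (T - 1)
        intro hnil; rw [hnil] at this; exact hne (List.eq_nil_of_length_eq_zero this.symm)
      obtain ⟨b, r2, hbr⟩ := List.exists_cons_of_ne_nil hsub
      have step : crun ds (h :: hs) (T + 1)
          = (if (0:Int) < (T : Int) + 1
              then (crun ds (h :: hs) T).getD 0 0 + PySem.List.pyGetD (crun ds hs T) 0 0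
              else (crun ds (h :: hs) T).getD 0 0) :: crun ds hs T := by
        show cstep ds ((T : Int) + 1) 0 (crun ds (h :: hs) T) = _
        rw [ih, hbr, cstep_cons_cons, cstep_shift ds ((T : Int) + 1) 0 (b :: r2)]
        have e : (T : Int) + 1 - 1 = (T : Int) := by ring
        rw [e, ← hbr, cstep_crun]
        simp only [List.getD_cons_zero]
      rw [step]
      rw [Nat.add_sub_cancel, List.getD_cons_zero]

theorem crun_head_succ (ds : List Int) (h : Int) (hs : List Int) (hne : hs ≠ []) (T : Nat) :
    (crun ds (h :: hs) (T + 1)).getD 0 0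
      = (crun ds (h :: hs) T).getD 0 0 + (crun ds hs T).getD 0 0 := by
  have hsub : crun ds hs (T - 1) ≠ [] := by
    have := crun_length ds hs (T - 1)
    intro hnil; rw [hnil] at this; exact hne (List.eq_nil_of_length_eq_zero this.symm)
  obtain ⟨b, r2, hbr⟩ := List.exists_cons_of_ne_nil hsub
  have step : crun ds (h :: hs) (T + 1)
      = ((crun ds (h :: hs) T).getD 0 0 + PySem.List.pyGetD (crun ds hs T) 0 0) :: crun ds hs T := by
    show cstep ds ((T : Int) + 1) 0 (crun ds (h :: hs) T) = _
    rw [crun_tail ds h hs hne T, hbr, cstep_cons_cons, cstep_shift ds ((T : Int) + 1) 0 (b :: r2)]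
    have e : (T : Int) + 1 - 1 = (T : Int) := by ring
    rw [e, ← hbr, cstep_crun]
    rw [if_pos (by positivity)]
    simp only [List.getD_cons_zero]
  rw [step]
  simp only [List.getD_cons_zero, PySem.List.pyGetD_zero]

theorem sc_map (N : Nat) : ∀ (u v : Nat → Int) (h : Int), u 0 = h →
    (∀ T : Nat, T ≤ N → u (T + 1) = u T + v T) →
    (List.range (N + 2)).map u = sc h ((List.range (N + 1)).map v) := by
  induction N with
  | zero =>
      intro u v h h0 hrec
      have h1 : u 1 = u 0 + v 0 := hrec 0 (by omega)
      rw [show List.range 2 = [0, 1] from rfl, show List.range 1 = [0] from rfl,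
          List.map_cons, List.map_cons, List.map_nil, List.map_cons, List.map_nil,
          show sc h [v 0] = [h, h + v 0] from rfl, h1, h0]
  | succ N ih =>
      intro u v h h0 hrec
      have hr : List.range (N + 1 + 1) = 0 :: (List.range (N + 1)).map Nat.succ :=
        List.range_succ_eq_map
      have hr2 : List.range (N + 1 + 2) = 0 :: (List.range (N + 1 + 1)).map Nat.succ := by
        have e : N + 1 + 2 = (N + 1 + 1) + 1 := by omega
        rw [e]; exact List.range_succ_eq_map
      rw [hr2, List.map_cons, List.map_map]
      conv_rhs => rw [hr, List.map_cons, List.map_map]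
      rw [show sc h (v 0 :: (List.range (N + 1)).map (v ∘ Nat.succ))
            = h :: sc (h + v 0) ((List.range (N + 1)).map (v ∘ Nat.succ)) from rfl, h0]
      congr 1
      rw [show N + 1 + 1 = N + 2 by omega]
      have := ih (fun T => u (T + 1)) (fun T => v (T + 1)) (h + v 0)
        (by show u (0 + 1) = h + v 0; rw [hrec 0 (by omega), h0])
        (fun T hT => hrec (T + 1) (by omega))
      simpa [Function.comp, Nat.succ_eq_add_one] using this

theorem crun_single (ds : List Int) (h : Int) : ∀ (T : Nat),
    crun ds [h] (T + 1) = [(crun ds [h] T).getD 0 0 + PySem.List.pyGetD ds (T : Int) 0] := by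
  intro T
  have hlen := crun_length ds [h] T
  obtain ⟨b, r2, hbr⟩ := List.exists_cons_of_ne_nil
    (by intro hnil; rw [hnil] at hlen; simp at hlen : crun ds [h] T ≠ [])
  have hr2 : r2 = [] := by rw [hbr] at hlen; simpa using hlen
  subst hr2
  show cstep ds ((T : Int) + 1) 0 (crun ds [h] T) = _
  rw [hbr, cstep_singleton, if_pos (by positivity)]
  have e : (T : Int) + 1 - 0 - 1 = (T : Int) := by ring
  rw [e]
  simp only [List.getD_cons_zero]

theorem map_pyGetD_range_self (ds : List Int) :
    (List.range ds.length).map (fun T : Nat => PySem.List.pyGetD ds (T : Int) 0) = ds := by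
  apply List.ext_getElem
  · simp
  · intro i h1 h2
    simp only [List.getElem_map, List.getElem_range]
    exact (PySem.List.pyGetD_natCast ds _ 0).trans
      (List.getD_eq_getElem ds 0 (by simpa using h2))

theorem cout_singleton (ds : List Int) (h : Int) :
    cout ds [h] ds.length = sc h ds := by
  cases hds : ds with
  | nil => simp [cout, crun, sc]
  | cons d0 dtl =>
      rw [← hds]
      have hlen : ds.length = dtl.length + 1 := by rw [hds]; rfl
      unfold cout
      rw [hlen, show dtl.length + 1 + 1 = dtl.length + 2 from rfl]
      rw [sc_map dtl.length (fun T => (crun ds [h] T).getD 0 0)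
            (fun T : Nat => PySem.List.pyGetD ds (T : Int) 0) h rfl
            (fun T _ => by
              show (crun ds [h] (T + 1)).getD 0 0
                = (crun ds [h] T).getD 0 0 + PySem.List.pyGetD ds (T : Int) 0
              rw [crun_single ds h T, List.getD_cons_zero])]
      congr 1
      rw [show dtl.length + 1 = ds.length from hlen.symm, map_pyGetD_range_self]

theorem cout_cons (ds : List Int) (h : Int) (hs : List Int) (hne : hs ≠ []) (N : Nat) :
    cout ds (h :: hs) (N + 1) = sc h (cout ds hs N) := by
  unfold cout
  rw [show N + 1 + 1 = N + 2 from rfl]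
  exact sc_map N (fun T => (crun ds (h :: hs) T).getD 0 0)
    (fun T => (crun ds hs T).getD 0 0) h rfl
    (fun T _ => crun_head_succ ds h hs hne T)

theorem cout_passes (ds : List Int) : ∀ (hl : List Int), hl ≠ [] →
    cout ds hl (ds.length + hl.length - 1) = passes hl ds := by
  intro hl
  induction hl with
  | nil => intro hne; exact absurd rfl hne
  | cons h hs ih =>
      intro _
      cases hhs : hs with
      | nil => simpa [passes] using cout_singleton ds h
      | cons b r2 =>
          rw [← hhs]
          have hne' : hs ≠ [] := by rw [hhs]; simp
          have hlen : 1 ≤ hs.length := by rw [hhs]; simp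
          have e : ds.length + (h :: hs).length - 1 = (ds.length + hs.length - 1) + 1 := by
            simp only [List.length_cons]; omega
          rw [e, cout_cons ds h hs hne', ih hne']
          rfl

theorem B_eq (deltas heads : List Int) (order : Int)
    (h1 : 1 ≤ order) (h2 : order ≤ (heads.length : Int)) :
    delta_decode_alt deltas heads order = passes (heads.take order.toNat) deltas := by
  have hslice : PySem.List.slice heads none (some order) = heads.take order.toNat := by
    rw [show order = ((order.toNat : Nat) : Int) from (Int.toNat_of_nonneg (by omega)).symm]
    exact PySem.List.slice_to_natCast heads order.toNat
  have htn : ((order.toNat : Nat) : Int) = order := Int.toNat_of_nonneg (by omega)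
  have hlen : (heads.take order.toNat).length = order.toNat := by
    rw [List.length_take]; omega
  have hne : heads.take order.toNat ≠ [] := by
    intro hnil
    rw [hnil] at hlen
    simp at hlen; omega
  unfold delta_decode_alt
  rw [if_neg (by omega)]
  simp only []
  rw [hslice]
  have eM : (deltas.length : Int) + order
      = ((deltas.length + order.toNat - 1 : Nat) : Int) + 1 := by omega
  rw [eM, B_fold deltas order (heads.take order.toNat) (deltas.length + order.toNat - 1)]
  simp only []
  have hcr : ∀ T : Nat, pFrun deltas order (heads.take order.toNat) T
      = crun deltas (heads.take order.toNat) T :=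
    pFrun_eq_crun deltas order (heads.take order.toNat) hne (by rw [hlen]; exact htn)
  rw [List.map_congr_left (fun T _ => by rw [hcr T, PySem.List.pyGetD_zero])]
  have : deltas.length + order.toNat - 1 = deltas.length + (heads.take order.toNat).length - 1 := by
    rw [hlen]
  rw [this]
  exact cout_passes deltas (heads.take order.toNat) hne

-- ===== VERDICT (by name: the statement is the Claim_ definition above) =====
theorem delta_decode_spec : Claim_equal_delta_decode := by
  intro deltas heads order _ hpre
  unfold Spec_delta_decode
  by_cases hle : order ≤ 0
  · unfold delta_decode delta_decode_alt
    rw [if_pos hle, PySem.List.pyRange_neg_one_eq_nil (by omega), List.foldl_nil]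
  · have h1 : 1 ≤ order := by omega
    have h2 : order ≤ (heads.length : Int) := by
      unfold Pre_delta_decode at hpre
      rcases hpre with h | h
      · omega
      · exact h
    rw [A_eq deltas heads order h1 h2, B_eq deltas heads order h1 h2]
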